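-- pv_equiv track=rewrite | github.com/702301350/Ctracker_Paddel | src/test.py | k_precive_observation
-- ===== SOURCE A (Python) =====
-- def k_precive_observation(observations, curr_frame, k):
--     if len(observations) == 0:
--         return [-1, -1, -1, -1]
--     for i in range(k):
--         dt = k - i
--         aim_age = curr_frame - dt
--         if aim_age >= 0 and aim_age < len(observations):
--             return observations[aim_age]
--     return observations[-1]
-- ===== SOURCE B (Python) =====
-- def k_precive_observation(observations, curr_frame, k):
--     if not observations:
--         return [-1, -1, -1, -1]
--     cand = max(curr_frame - k, 0)
--     if k > 0 and curr_frame - 1 >= 0 and cand < len(observations):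
--         return observations[cand]
--     return observations[-1]
-- ===== Notes on version B (the rewrite author's own statement) =====
-- stated objective: simpler
-- what changed: Replaced the O(k) scan over range(k) with a direct O(1) computation of the first in-range index max(curr_frame-k, 0) of the window, guarded by a closed-form emptiness test.
import Mathlib
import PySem

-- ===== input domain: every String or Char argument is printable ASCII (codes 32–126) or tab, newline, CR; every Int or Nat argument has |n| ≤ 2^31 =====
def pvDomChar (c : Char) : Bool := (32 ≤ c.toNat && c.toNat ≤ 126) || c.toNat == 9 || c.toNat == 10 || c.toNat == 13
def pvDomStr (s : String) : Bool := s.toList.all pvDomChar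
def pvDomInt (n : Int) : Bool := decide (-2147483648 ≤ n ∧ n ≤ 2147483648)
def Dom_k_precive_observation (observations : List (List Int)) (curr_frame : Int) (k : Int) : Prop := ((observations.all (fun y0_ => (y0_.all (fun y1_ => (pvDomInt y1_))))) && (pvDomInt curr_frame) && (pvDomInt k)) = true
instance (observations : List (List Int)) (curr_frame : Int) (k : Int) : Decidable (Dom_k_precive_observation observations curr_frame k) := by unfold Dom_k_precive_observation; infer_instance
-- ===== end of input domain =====

-- B replaces A's O(k) scan over range(k) by the O(1) closed-form first in-range index; return values proved equal on all inputs.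

-- ===== PORT A =====
-- the for-loop of A: returns some obs[aim_age] at the first hit, none if the loop falls through
def kLoopA (observations : List (List Int)) (curr_frame : Int) (k : Int) : List Int → Option (List Int)
  | [] => none
  | i :: rest =>
    let dt := k - i
    let aim_age := curr_frame - dt
    if 0 ≤ aim_age ∧ aim_age < (observations.length : Int) then
      some ((PySem.List.pyGet? observations aim_age).getD [])  -- in-bounds by the guard
    else
      kLoopA observations curr_frame k rest

def k_precive_observation (observations : List (List Int)) (curr_frame : Int) (k : Int) : List Int :=
  if observations.length = 0 then [-1, -1, -1, -1]
  else
    match kLoopA observations curr_frame k (PySem.List.pyRange 0 k 1) with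
    | some r => r
    | none => (PySem.List.pyGet? observations (-1)).getD []  -- in-bounds: list nonempty

-- ===== PORT B =====
def k_precive_observation_alt (observations : List (List Int)) (curr_frame : Int) (k : Int) : List Int :=
  if observations = [] then [-1, -1, -1, -1]
  else
    let cand := max (curr_frame - k) 0
    if 0 < k ∧ 0 ≤ curr_frame - 1 ∧ cand < (observations.length : Int) then
      (PySem.List.pyGet? observations cand).getD []
    else
      (PySem.List.pyGet? observations (-1)).getD []

-- ===== PRECONDITION & SPEC =====
def Spec_k_precive_observation (observations : List (List Int)) (curr_frame : Int) (k : Int) (out : List Int) : Prop := out = k_precive_observation_alt observations curr_frame k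
instance (observations : List (List Int)) (curr_frame : Int) (k : Int) (out : List Int) : Decidable (Spec_k_precive_observation observations curr_frame k out) := by unfold Spec_k_precive_observation; infer_instance

-- ===== CLAIM (what is proved, stated in full; the proofs are below) =====
def Claim_equal_k_precive_observation : Prop := ∀ (observations : List (List Int)) (curr_frame : Int) (k : Int), Dom_k_precive_observation observations curr_frame k → Spec_k_precive_observation observations curr_frame k (k_precive_observation observations curr_frame k)

-- ===== LEMMAS AND PROOFS =====

-- closed form of A's loop, for the suffix of range(k) starting at a ≥ 0
theorem kLoopA_closed (observations : List (List Int)) (curr_frame k : Int) :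
    ∀ (n : Nat) (a : Int), 0 ≤ a → (k - a).toNat = n →
    kLoopA observations curr_frame k (PySem.List.pyRange a k 1) =
      (if a < k ∧ 1 ≤ curr_frame ∧ max (curr_frame - k + a) 0 < (observations.length : Int) then
        some ((PySem.List.pyGet? observations (max (curr_frame - k + a) 0)).getD [])
      else none) := by
  intro n
  induction n with
  | zero =>
    intro a ha hn
    have hka : ¬ a < k := by omega
    rw [PySem.List.pyRange_one a k, show (k - a).toNat = 0 from hn]
    simp [kLoopA, hka]
  | succ m ih =>
    intro a ha hn
    have hak : a < k := by omega
    rw [PySem.List.pyRange_one_cons hak]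
    show (if 0 ≤ curr_frame - (k - a) ∧ curr_frame - (k - a) < (observations.length : Int) then
        some ((PySem.List.pyGet? observations (curr_frame - (k - a))).getD [])
      else kLoopA observations curr_frame k (PySem.List.pyRange (a + 1) k 1)) = _
    have hlen : (0 : Int) ≤ (observations.length : Int) := by positivity
    by_cases hc : 0 ≤ curr_frame - (k - a) ∧ curr_frame - (k - a) < (observations.length : Int)
    · have h1 : a < k ∧ 1 ≤ curr_frame ∧ max (curr_frame - k + a) 0 < (observations.length : Int) := by
        constructor; · exact hak
        constructor; · omega
        · omega
      have h2 : max (curr_frame - k + a) 0 = curr_frame - (k - a) := by omega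
      simp only [if_pos hc, h2]
      rw [if_pos (h2 ▸ h1)]
    · rw [if_neg hc, ih (a + 1) (by omega) (by omega)]
      by_cases h1 : a + 1 < k ∧ 1 ≤ curr_frame ∧ max (curr_frame - k + (a + 1)) 0 < (observations.length : Int)
      · have h2 : a < k ∧ 1 ≤ curr_frame ∧ max (curr_frame - k + a) 0 < (observations.length : Int) := by
          omega
        have h3 : max (curr_frame - k + (a + 1)) 0 = max (curr_frame - k + a) 0 := by omega
        rw [if_pos h1, if_pos h2, h3]
      · rw [if_neg h1, if_neg (by omega)]

-- ===== VERDICT (by name: the statement is the Claim_ definition above) =====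
theorem k_precive_observation_spec : Claim_equal_k_precive_observation := by
  intro observations curr_frame k _
  unfold Spec_k_precive_observation k_precive_observation k_precive_observation_alt
  by_cases hnil : observations = []
  · simp [hnil]
  · have hlen : observations.length ≠ 0 := by simpa using hnil
    rw [if_neg hlen, if_neg hnil,
        kLoopA_closed observations curr_frame k (k - 0).toNat 0 le_rfl rfl]
    by_cases hc : 0 < k ∧ 1 ≤ curr_frame ∧ max (curr_frame - k + 0) 0 < (observations.length : Int)
    · rw [if_pos hc]
      have h2 : 0 < k ∧ 0 ≤ curr_frame - 1 ∧ max (curr_frame - k) 0 < (observations.length : Int) := by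
        omega
      rw [if_pos h2]
      simp
    · rw [if_neg hc, if_neg (by omega)]
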